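-- pv_equiv track=rewrite | github.com/letuhao/novel-analyzer | translate_pipeline.py | build_line_chunks
-- ===== SOURCE A (Python) =====
-- def build_line_chunks(text: str, max_chunk_chars: int) -> list[str]:
--     """
--     Pack whole lines (split on '\\n') into chunks without breaking inside a line.
--     If a single line exceeds max_chunk_chars, it becomes its own chunk (overflow).
--     """
--     if max_chunk_chars < 64:
--         max_chunk_chars = 64
--     lines = text.split("\n")
--     chunks: list[str] = []
--     buf: list[str] = []
--     cur_len = 0
--
--     for line in lines:
--         add_len = len(line) + (1 if buf else 0)
--         if buf and cur_len + add_len > max_chunk_chars: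
--             chunks.append("\n".join(buf))
--             buf = [line]
--             cur_len = len(line)
--         else:
--             buf.append(line)
--             cur_len += add_len
--
--     if buf:
--         chunks.append("\n".join(buf))
--     return chunks
-- ===== SOURCE B (Python) =====
-- def build_line_chunks(text: str, max_chunk_chars: int) -> list[str]:
--     # Prefix-sum + binary-search chunking: precompute cumulative joined
--     # lengths once, then locate each chunk's end by binary search on the
--     # prefix array (rightmost boundary whose joined length still fits),
--     # emitting the chunk as a single slice join.
--     m = 64 if max_chunk_chars < 64 else max_chunk_chars
--     lines = text.split("\n")
--     n = len(lines)
--     pref = [0]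
--     acc = 0
--     for l in lines:
--         acc += len(l) + 1
--         pref.append(acc)  # pref[k] - pref[i] - 1 == len("\n".join(lines[i:k]))
--     chunks = []
--     i = 0
--     while i < n:
--         target = pref[i] + m + 1      # pref[j] <= target  <=>  join of lines[i:j] fits
--         lo, hi = i + 1, n             # chunk end in [i+1, n]: the seed line is always admitted
--         while lo < hi:                # rightmost j with pref[j] <= target (pref is increasing)
--             mid = (lo + hi + 1) // 2
--             if pref[mid] <= target:
--                 lo = mid
--             else:
--                 hi = mid - 1
--         chunks.append("\n".join(lines[i:lo]))
--         i = lo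
--     return chunks
-- ===== Notes on version B (the rewrite author's own statement) =====
-- stated objective: alternative
-- what changed: Replaces A's single flat pass with a flush buffer by a staged prefix-sum algorithm: cumulative joined lengths are precomputed once and each chunk boundary is found by binary search on that array, the chunk emitted as one slice join.
import Mathlib
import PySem

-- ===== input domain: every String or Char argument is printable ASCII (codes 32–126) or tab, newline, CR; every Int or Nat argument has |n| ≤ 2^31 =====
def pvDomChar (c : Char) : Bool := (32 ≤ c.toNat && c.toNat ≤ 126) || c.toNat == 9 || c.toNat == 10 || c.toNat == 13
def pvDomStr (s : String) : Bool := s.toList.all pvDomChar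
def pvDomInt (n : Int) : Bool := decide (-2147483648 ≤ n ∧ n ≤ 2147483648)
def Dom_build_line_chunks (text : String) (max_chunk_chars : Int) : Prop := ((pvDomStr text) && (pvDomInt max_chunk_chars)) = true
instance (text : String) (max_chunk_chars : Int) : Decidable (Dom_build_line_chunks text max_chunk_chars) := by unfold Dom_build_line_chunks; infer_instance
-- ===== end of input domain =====

-- B replaces A's flat flush-buffer pass by a staged prefix-sum + binary-search chunker (alternative decomposition, same cost class).


-- ===== PORT A =====
-- A's loop body: state (chunks, buf, cur_len)
def stepA (m : Int) (st : List String × List String × Int) (line : String) : List String × List String × Int :=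
  let add_len : Int := PySem.Str.len line + (if st.2.1 ≠ [] then 1 else 0)
  if st.2.1 ≠ [] ∧ st.2.2 + add_len > m then
    (st.1 ++ [PySem.Str.join "\n" st.2.1], [line], PySem.Str.len line)
  else
    (st.1, st.2.1 ++ [line], st.2.2 + add_len)

-- A's trailing 'if buf: chunks.append(...)'
def finishA (st : List String × List String × Int) : List String :=
  if st.2.1 ≠ [] then st.1 ++ [PySem.Str.join "\n" st.2.1] else st.1

def build_line_chunks (text : String) (max_chunk_chars : Int) : List String :=
  let m : Int := if max_chunk_chars < 64 then 64 else max_chunk_chars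
  let lines := (PySem.Str.split? text "\n").getD []   -- text.split("\n"); sep ≠ "" so split? is 'some'
  finishA (lines.foldl (stepA m) ([], [], 0))

-- ===== PORT B =====
-- B's inner while loop: rightmost j in [lo, hi] with pref[j] <= target.
-- fuel is a totality guard only: it bounds the iteration count (the gap hi - lo
-- shrinks each step) and never changes the computed value; the getD default is
-- never read (index proven in range in the proofs).
def bsearchB (pref : List Int) (target : Int) : Nat → Int → Int → Int
  | 0, lo, _ => lo
  | fuel + 1, lo, hi =>
    if lo < hi then
      let mid := PySem.Int.floordiv (lo + hi + 1) 2
      if (PySem.List.pyGet? pref mid).getD 0 ≤ target then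
        bsearchB pref target fuel mid hi
      else
        bsearchB pref target fuel lo (mid - 1)
    else lo

-- B's outer while loop: find the chunk end by binary search, emit the slice join,
-- jump there. fuel is a totality guard (i strictly increases every iteration).
def outerB (pref : List Int) (lines : List String) (m : Int) : Nat → Int → List String
  | 0, _ => []
  | fuel + 1, i =>
    if i < PySem.List.len lines then
      let target := (PySem.List.pyGet? pref i).getD 0 + m + 1
      let j := bsearchB pref target (PySem.List.len lines - (i + 1)).toNat (i + 1) (PySem.List.len lines)
      PySem.Str.join "\n" (PySem.List.slice lines (some i) (some j)) :: outerB pref lines m fuel j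
    else []

def build_line_chunks_alt (text : String) (max_chunk_chars : Int) : List String :=
  let m : Int := if max_chunk_chars < 64 then 64 else max_chunk_chars
  let lines := (PySem.Str.split? text "\n").getD []
  -- pref[k] = cumulative length: pref[k] - pref[i] - 1 = len("\n".join(lines[i:k]))
  let st := lines.foldl (fun (st : List Int × Int) l =>
      let acc := st.2 + PySem.Str.len l + 1
      (st.1 ++ [acc], acc)) ([0], 0)
  outerB st.1 lines m (lines.length + 1) 0

-- ===== PRECONDITION & SPEC =====
def Spec_build_line_chunks (text : String) (max_chunk_chars : Int) (out : List String) : Prop := out = build_line_chunks_alt text max_chunk_chars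
instance (text : String) (max_chunk_chars : Int) (out : List String) : Decidable (Spec_build_line_chunks text max_chunk_chars out) := by unfold Spec_build_line_chunks; infer_instance

-- ===== CLAIM (what is proved, stated in full; the proofs are below) =====
def Claim_equal_build_line_chunks : Prop := ∀ (text : String) (max_chunk_chars : Int), Dom_build_line_chunks text max_chunk_chars → Spec_build_line_chunks text max_chunk_chars (build_line_chunks text max_chunk_chars)

-- ===== LEMMAS AND PROOFS =====

-- proof-side recursion describing A's greedy fill of a single chunk (taken lines, rest)
def fillB (m : Int) : List String → Int → List String × List String
  | [], _ => ([], [])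
  | l :: rest, cur_len =>
    if cur_len + 1 + PySem.Str.len l ≤ m then
      let p := fillB m rest (cur_len + 1 + PySem.Str.len l)
      (l :: p.1, p.2)
    else ([], l :: rest)

theorem fillB_snd_len (m : Int) (ls : List String) (c : Int) :
    (fillB m ls c).2.length ≤ ls.length := by
  induction ls generalizing c with
  | nil => simp [fillB]
  | cons l rest ih =>
    simp only [fillB]
    split
    · exact le_trans (ih _) (Nat.le_succ _)
    · simp

-- proof-side chunk-by-chunk recursion: common reference shape for both ports
def chunksB (m : Int) : List String → List String
  | [] => []
  | l :: rest =>
    let p := fillB m rest (PySem.Str.len l)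
    PySem.Str.join "\n" (l :: p.1) :: chunksB m p.2
termination_by ls => ls.length
decreasing_by exact Nat.lt_succ_of_le (fillB_snd_len m rest _)

-- With a nonempty buffer, finishing A's loop produces the already-emitted chunks,
-- then the chunk completed by the greedy fill, then the remaining chunks.
theorem key (m : Int) (ls : List String) :
    ∀ (chunks buf : List String) (cur_len : Int), buf ≠ [] →
    finishA (ls.foldl (stepA m) (chunks, buf, cur_len)) =
      chunks ++ (PySem.Str.join "\n" (buf ++ (fillB m ls cur_len).1)
                 :: chunksB m (fillB m ls cur_len).2) := by
  induction ls with
  | nil =>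
    intro chunks buf cur_len hbuf
    simp [finishA, fillB, chunksB, hbuf]
  | cons l rest ih =>
    intro chunks buf cur_len hbuf
    simp only [List.foldl_cons, stepA, hbuf, ne_eq, not_false_eq_true, if_pos, true_and, fillB]
    by_cases h : cur_len + 1 + PySem.Str.len l ≤ m
    · have h' : ¬ (cur_len + (PySem.Str.len l + 1) > m) := by omega
      rw [if_neg (by simpa using h'), if_pos h]
      have hc : cur_len + (PySem.Str.len l + 1) = cur_len + 1 + PySem.Str.len l := by ring
      rw [hc, ih _ _ _ (by simp)]
      simp
    · have h' : cur_len + (PySem.Str.len l + 1) > m := by omega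
      rw [if_pos (by simpa using h'), if_neg h]
      rw [ih _ [l] (PySem.Str.len l) (by simp)]
      simp [chunksB]

theorem loop_eq_chunksB (m : Int) (ls : List String) :
    finishA (ls.foldl (stepA m) ([], [], 0)) = chunksB m ls := by
  cases ls with
  | nil => simp [finishA, chunksB]
  | cons l rest =>
    simp only [List.foldl_cons, stepA]
    rw [if_neg (by simp)]
    simp only [ne_eq, List.nil_append]
    rw [key m rest [] [l] _ (by simp)]
    simp [chunksB]

-- ---- B side: prefix sums ----

-- Pf lines k = pref[k]: joined length of lines[:k] plus one
def Pf (lines : List String) (k : Nat) : Int :=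
  ((lines.take k).map PySem.Str.len).sum + k

theorem Pf_zero (lines : List String) : Pf lines 0 = 0 := by simp [Pf]

theorem Pf_cons (l : String) (ls : List String) (t : Nat) :
    Pf (l :: ls) (t + 1) = PySem.Str.len l + 1 + Pf ls t := by
  simp [Pf]; ring

theorem Pf_succ (lines : List String) (k : Nat) (hk : k < lines.length) :
    Pf lines (k + 1) = Pf lines k + PySem.Str.len lines[k] + 1 := by
  unfold Pf
  rw [List.take_add_one, List.getElem?_eq_getElem hk]
  simp only [Option.toList_some, List.map_append, List.sum_append, List.map_cons,
    List.map_nil, List.sum_cons, List.sum_nil]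
  push_cast
  ring

theorem len_nonneg (s : String) : 0 ≤ PySem.Str.len s := by
  simp [PySem.Str.len_eq]

theorem lens_sum_nonneg (ls : List String) : 0 ≤ (ls.map PySem.Str.len).sum :=
  List.sum_nonneg (by
    intro x hx
    obtain ⟨s, _, rfl⟩ := List.mem_map.mp hx
    exact len_nonneg s)

theorem Pf_mono (lines : List String) (a b : Nat) (hab : a ≤ b) :
    Pf lines a ≤ Pf lines b := by
  unfold Pf
  obtain ⟨d, rfl⟩ := Nat.exists_eq_add_of_le hab
  have hsplit : lines.take (a + d) = lines.take a ++ (lines.drop a).take d := List.take_add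
  rw [hsplit, List.map_append, List.sum_append]
  have h1 := lens_sum_nonneg ((lines.drop a).take d)
  have : (a : Int) ≤ (a : Int) + (d : Int) := by omega
  push_cast
  omega

-- the built pref list is the prefix-sum table
theorem pref_build (lines : List String) : ∀ (p0 : List Int) (a0 : Int),
    lines.foldl (fun (st : List Int × Int) l =>
      let acc := st.2 + PySem.Str.len l + 1
      (st.1 ++ [acc], acc)) (p0, a0) =
    (p0 ++ (List.range lines.length).map (fun t => a0 + Pf lines (t + 1)),
     a0 + Pf lines lines.length) := by
  induction lines with
  | nil => intro p0 a0; simp [Pf]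
  | cons l ls ih =>
    intro p0 a0
    have hmap : (List.range (ls.length + 1)).map (fun t => a0 + Pf (l :: ls) (t + 1))
        = (a0 + (PySem.Str.len l + 1 + Pf ls 0))
          :: (List.range ls.length).map (fun t => a0 + PySem.Str.len l + 1 + Pf ls (t + 1)) := by
      rw [List.range_succ_eq_map, List.map_cons, List.map_map, List.cons.injEq]
      constructor
      · show a0 + Pf (l :: ls) (0 + 1) = a0 + (PySem.Str.len l + 1 + Pf ls 0)
        rw [Pf_cons]
      · apply List.map_congr_left
        intro t _
        show a0 + Pf (l :: ls) (t + 1 + 1) = a0 + PySem.Str.len l + 1 + Pf ls (t + 1)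
        rw [Pf_cons]
        ring
    rw [List.foldl_cons]
    show List.foldl (fun (st : List Int × Int) l =>
        let acc := st.2 + PySem.Str.len l + 1
        (st.1 ++ [acc], acc)) (p0 ++ [a0 + PySem.Str.len l + 1], a0 + PySem.Str.len l + 1) ls = _
    rw [ih]
    rw [List.length_cons, hmap, Pf_zero, Prod.mk.injEq]
    refine ⟨?_, by rw [Pf_cons]; ring⟩
    rw [List.append_assoc, List.singleton_append]
    congr 2
    ring

theorem pref_get (lines : List String) (j : Nat) (hj : j ≤ lines.length) :
    (PySem.List.pyGet? ([0] ++ (List.range lines.length).map (fun t => 0 + Pf lines (t + 1))) (j : Int)).getD 0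
      = Pf lines j := by
  rw [PySem.List.pyGet?_natCast]
  cases j with
  | zero => simp [Pf_zero]
  | succ t =>
    have ht : t < lines.length := by omega
    simp [ht]

-- characterization of the binary search on a monotone table
theorem bsearch_char (pref : List Int) (P : Nat → Int) (n : Nat) (target : Int)
    (hget : ∀ j : Nat, j ≤ n → (PySem.List.pyGet? pref (j : Int)).getD 0 = P j) :
    ∀ (fuel : Nat) (lo hi : Int), 0 ≤ lo → lo ≤ hi → hi ≤ (n : Int) → (hi - lo).toNat ≤ fuel →
      lo ≤ bsearchB pref target fuel lo hi ∧ bsearchB pref target fuel lo hi ≤ hi ∧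
      (bsearchB pref target fuel lo hi = lo ∨ P (bsearchB pref target fuel lo hi).toNat ≤ target) ∧
      (bsearchB pref target fuel lo hi < hi → target < P ((bsearchB pref target fuel lo hi).toNat + 1)) := by
  intro fuel
  induction fuel with
  | zero =>
    intro lo hi h0 hlohi hhin hf
    have hb : bsearchB pref target 0 lo hi = lo := rfl
    rw [hb]
    exact ⟨le_refl _, hlohi, Or.inl rfl, by omega⟩
  | succ f ih =>
    intro lo hi h0 hlohi hhin hf
    by_cases h : lo < hi
    · have hb := PySem.Int.floordiv_two_mid_bounds (lo := lo + 1) (hi := hi) (by omega)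
      have he : lo + 1 + hi = lo + hi + 1 := by ring
      rw [he] at hb
      have hstep : bsearchB pref target (f + 1) lo hi
          = if (PySem.List.pyGet? pref (PySem.Int.floordiv (lo + hi + 1) 2)).getD 0 ≤ target
            then bsearchB pref target f (PySem.Int.floordiv (lo + hi + 1) 2) hi
            else bsearchB pref target f lo (PySem.Int.floordiv (lo + hi + 1) 2 - 1) := by
        rw [bsearchB, if_pos h]
      set mid := PySem.Int.floordiv (lo + hi + 1) 2 with hmiddef
      have hmidP : (PySem.List.pyGet? pref mid).getD 0 = P mid.toNat := by
        have h' := hget mid.toNat (by omega)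
        rwa [show ((mid.toNat : Nat) : Int) = mid by omega] at h'
      by_cases hc : (PySem.List.pyGet? pref mid).getD 0 ≤ target
      · rw [hstep, if_pos hc]
        obtain ⟨r1, r2, r3, r4⟩ := ih mid hi (by omega) (by omega) hhin (by omega)
        refine ⟨by omega, r2, ?_, r4⟩
        rcases r3 with h1 | h1
        · right; rw [h1]; rw [hmidP] at hc; exact hc
        · right; exact h1
      · rw [hstep, if_neg hc]
        obtain ⟨r1, r2, r3, r4⟩ := ih lo (mid - 1) h0 (by omega) (by omega) (by omega)
        refine ⟨r1, by omega, r3, ?_⟩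
        intro hrlt
        by_cases hr : bsearchB pref target f lo (mid - 1) < mid - 1
        · exact r4 hr
        · have hreq : bsearchB pref target f lo (mid - 1) = mid - 1 := by omega
          rw [hmidP] at hc
          have heq : (bsearchB pref target f lo (mid - 1)).toNat + 1 = mid.toNat := by omega
          rw [heq]
          omega
    · have hstep : bsearchB pref target (f + 1) lo hi = lo := by
        rw [bsearchB, if_neg h]
      rw [hstep]
      exact ⟨le_refl _, hlohi, Or.inl rfl, by omega⟩

-- the greedy fill characterized by the prefix table
theorem fill_char (m : Int) (lines : List String) (i : Nat) :
    ∀ (b : Nat), i < b → b ≤ lines.length →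
    ∃ j : Nat, b ≤ j ∧ j ≤ lines.length ∧
      (fillB m (lines.drop b) (Pf lines b - Pf lines i - 1)).1 = (lines.drop b).take (j - b) ∧
      (fillB m (lines.drop b) (Pf lines b - Pf lines i - 1)).2 = lines.drop j ∧
      (∀ t : Nat, b < t → t ≤ j → Pf lines t ≤ Pf lines i + m + 1) ∧
      (j < lines.length → ¬ (Pf lines (j + 1) ≤ Pf lines i + m + 1)) := by
  intro b
  induction hn : lines.length - b using Nat.strong_induction_on generalizing b with
  | _ n ihn =>
    intro hib hbn
    by_cases hb : b < lines.length
    · have hdrop : lines.drop b = lines[b] :: lines.drop (b + 1) :=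
        List.drop_eq_getElem_cons hb
      rw [hdrop]
      simp only [fillB]
      have hsum : Pf lines b - Pf lines i - 1 + 1 + PySem.Str.len lines[b]
          = Pf lines (b + 1) - Pf lines i - 1 := by
        rw [Pf_succ lines b hb]; ring
      by_cases hc : Pf lines b - Pf lines i - 1 + 1 + PySem.Str.len lines[b] ≤ m
      · rw [if_pos hc]
        rw [hsum]
        obtain ⟨j, hj1, hj2, hj3, hj4, hj5, hj6⟩ :=
          ihn (lines.length - (b + 1)) (by omega) (b + 1) rfl (by omega) (by omega)
        refine ⟨j, by omega, hj2, ?_, hj4, ?_, hj6⟩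
        · simp only [hj3]
          have : j - b = (j - (b + 1)) + 1 := by omega
          rw [this, List.take_succ_cons]
        · intro t ht1 ht2
          by_cases htb : t = b + 1
          · subst htb; rw [hsum] at hc; omega
          · exact hj5 t (by omega) ht2
      · rw [if_neg hc]
        refine ⟨b, le_refl _, by omega, by simp, by rw [hdrop], by omega, ?_⟩
        intro _
        rw [hsum] at hc
        omega
    · have hbe : b = lines.length := by omega
      subst hbe
      refine ⟨lines.length, le_refl _, le_refl _, ?_, ?_, by omega, by omega⟩ <;>
        simp [fillB]

-- the two chunk recursions coincide
theorem outer_eq (m : Int) (lines : List String) (pref : List Int)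
    (hget : ∀ j : Nat, j ≤ lines.length → (PySem.List.pyGet? pref (j : Int)).getD 0 = Pf lines j) :
    ∀ (fuel : Nat) (i : Nat), i ≤ lines.length → lines.length - i < fuel →
      chunksB m (lines.drop i) = outerB pref lines m fuel (i : Int) := by
  intro fuel
  induction fuel with
  | zero => intro i _ hf; omega
  | succ f ih =>
    intro i hin hf
    have hlen : PySem.List.len lines = (lines.length : Int) := by
      simp [PySem.List.len_eq]
    by_cases hi : i < lines.length
    · have hdrop : lines.drop i = lines[i] :: lines.drop (i + 1) :=
        List.drop_eq_getElem_cons hi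
      rw [hdrop]
      rw [chunksB]
      have htarget : (PySem.List.pyGet? pref (i : Int)).getD 0 + m + 1 = Pf lines i + m + 1 := by
        rw [hget i (by omega)]
      have hstep : outerB pref lines m (f + 1) (i : Int)
          = PySem.Str.join "\n" (PySem.List.slice lines (some (i : Int))
              (some (bsearchB pref ((PySem.List.pyGet? pref (i : Int)).getD 0 + m + 1)
                (PySem.List.len lines - ((i : Int) + 1)).toNat ((i : Int) + 1) (PySem.List.len lines))))
            :: outerB pref lines m f
                (bsearchB pref ((PySem.List.pyGet? pref (i : Int)).getD 0 + m + 1)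
                  (PySem.List.len lines - ((i : Int) + 1)).toNat ((i : Int) + 1) (PySem.List.len lines)) := by
        rw [outerB, if_pos (by rw [hlen]; exact_mod_cast hi)]
      rw [hstep, hlen, htarget]
      -- greedy fill result
      have hcur : PySem.Str.len lines[i] = Pf lines (i + 1) - Pf lines i - 1 := by
        rw [Pf_succ lines i hi]; ring
      obtain ⟨j, hj1, hj2, hj3, hj4, hj5, hj6⟩ := fill_char m lines i (i + 1) (by omega) (by omega)
      -- binary search result
      have hbs := bsearch_char pref (Pf lines) lines.length (Pf lines i + m + 1) hget
        ((lines.length : Int) - ((i : Int) + 1)).toNat ((i : Int) + 1) (lines.length : Int)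
        (by omega) (by exact_mod_cast hi) (le_refl _) (le_refl _)
      set r := bsearchB pref (Pf lines i + m + 1)
        ((lines.length : Int) - ((i : Int) + 1)).toNat ((i : Int) + 1) (lines.length : Int) with hrdef
      have hrj : r = (j : Int) := by
        obtain ⟨hr1, hr2, hr3, hr4⟩ := hbs
        by_contra hne
        rcases lt_or_gt_of_ne hne with hlt | hgt
        · -- r < j : fill admits boundary r+1, search says it does not fit
          have hrn : r.toNat < j := by omega
          have h5 := hj5 (r.toNat + 1) (by omega) (by omega)
          have h4 := hr4 (by omega)
          omega
        · -- j < r : search found P r ≤ target, fill stopped at j < r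
          have hPr : Pf lines r.toNat ≤ Pf lines i + m + 1 := by
            rcases hr3 with h | h
            · omega
            · exact h
          have hmono' : Pf lines (j + 1) ≤ Pf lines r.toNat := Pf_mono lines (j + 1) r.toNat (by omega)
          have h6 := hj6 (by omega)
          omega
      rw [hrj]
      congr 1
      · -- emitted chunk: slice join = seed :: fill
        rw [PySem.List.slice_natCast]
        congr 1
        rw [hdrop]
        have : j - i = (j - (i + 1)) + 1 := by omega
        rw [this, List.take_succ_cons]
        congr 1
        rw [← hj3, hcur]
      · -- tail
        rw [hcur, hj4]
        exact ih j hj2 (by omega)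
    · have hie : i = lines.length := by omega
      subst hie
      rw [outerB, if_neg (by rw [hlen]; omega)]
      simp [chunksB]

-- ===== VERDICT (by name: the statement is the Claim_ definition above) =====
theorem build_line_chunks_spec : Claim_equal_build_line_chunks := by
  intro text max_chunk_chars _
  unfold Spec_build_line_chunks build_line_chunks build_line_chunks_alt
  set m : Int := if max_chunk_chars < 64 then 64 else max_chunk_chars with hm
  set lines := (PySem.Str.split? text "\n").getD [] with hl
  simp only [pref_build, loop_eq_chunksB]
  have h := outer_eq m lines
      ([0] ++ (List.range lines.length).map (fun t => 0 + Pf lines (t + 1)))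
      (fun j hj => pref_get lines j hj) (lines.length + 1) 0 (by omega) (by omega)
  rw [List.drop_zero] at h
  exact_mod_cast h
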